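-- pv_equiv track=rewrite | github.com/thanglq150188/libra-core | libra/response/async_streams.py | tokens_from
-- ===== SOURCE A (Python) =====
-- from typing import Dict, List, Tuple, AsyncGenerator
--
-- def tokens_from(text: str) -> List[str]: # type: ignore
--     tokens = text.split(' ')
--     output_tokens = []
--     for token in tokens:
--         output_tokens.append(token)
--         output_tokens.append(' ')
--     output_tokens = output_tokens[:-1]
--     return output_tokens
-- ===== SOURCE B (Python) =====
-- def tokens_from(text):
--     # Single pass over the characters: emit the finished chunk and a single-space
--     # at each space, and the final chunk at the end. No split, no interleave,
--     # no [:-1] trim needed.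
--     out = []
--     cur = []
--     for ch in text:
--         if ch == ' ':
--             out.append(''.join(cur))
--             out.append(' ')
--             cur = []
--         else:
--             cur.append(ch)
--     out.append(''.join(cur))
--     return out
-- ===== Notes on version B (the rewrite author's own statement) =====
-- stated objective: alternative
-- what changed: Replaces split-on-space, interleave-spaces, then trim-last with a single character scan that emits each chunk plus a separator token at every space and the final chunk at the end.
import Mathlib
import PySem

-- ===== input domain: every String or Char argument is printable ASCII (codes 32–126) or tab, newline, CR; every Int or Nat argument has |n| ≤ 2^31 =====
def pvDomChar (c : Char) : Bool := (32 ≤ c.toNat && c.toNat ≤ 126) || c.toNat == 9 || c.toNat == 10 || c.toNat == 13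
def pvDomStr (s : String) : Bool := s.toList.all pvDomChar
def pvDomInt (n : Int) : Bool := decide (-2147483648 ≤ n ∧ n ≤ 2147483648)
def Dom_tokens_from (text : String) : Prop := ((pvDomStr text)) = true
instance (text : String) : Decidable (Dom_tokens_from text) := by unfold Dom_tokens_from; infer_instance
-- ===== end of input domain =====

-- B replaces split-then-interleave-then-trim with a single character scan emitting chunks and ' ' tokens (alternative decomposition, same cost).


-- ===== PORT A =====
-- tokens = text.split(' '); append each token then ' '; drop the last element.
def tokens_from (text : String) : List String :=
  -- tokens = text.split(' ')
  -- for token in tokens: output_tokens += [token, ' ']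
  -- output_tokens[:-1]
  PySem.List.slice
    (((PySem.Chars.splitOn text.toList [' ']).map String.ofList).foldl
      (fun acc token => acc ++ [token, " "]) [])
    none (some (-1))

-- ===== PORT B =====
-- B's loop over the characters of text: cur accumulates the current chunk; at a
-- space emit the chunk and " ", at the end emit the final chunk. Exact transcription of Source B.
def tokensScan : List Char → List Char → List String
  | [], cur => [String.ofList cur]
  | c :: rest, cur =>
      if c = ' ' then String.ofList cur :: " " :: tokensScan rest []
      else tokensScan rest (cur ++ [c])

def tokens_from_alt (text : String) : List String := tokensScan text.toList []

-- ===== PRECONDITION & SPEC =====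
def Spec_tokens_from (text : String) (out : List String) : Prop := out = tokens_from_alt text
instance (text : String) (out : List String) : Decidable (Spec_tokens_from text out) := by unfold Spec_tokens_from; infer_instance

-- ===== CLAIM (what is proved, stated in full; the proofs are below) =====
def Claim_equal_tokens_from : Prop := ∀ (text : String), Dom_tokens_from text → Spec_tokens_from text (tokens_from text)

-- ===== LEMMAS AND PROOFS =====

/-- Prepend `p` to the head chunk (a singleton `[p]` if there is no chunk). -/
def consHead (p : List Char) : List (List Char) → List (List Char)
  | [] => [p]
  | h :: t => (p ++ h) :: t

/-- Pure recursive split on the single character ' '. -/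
def splitSp : List Char → List (List Char)
  | [] => [[]]
  | c :: rest => if c = ' ' then [] :: splitSp rest else consHead [c] (splitSp rest)

lemma splitSp_ne_nil : ∀ l : List Char, ∃ h t, splitSp l = h :: t := by
  intro l
  cases l with
  | nil => exact ⟨[], [], rfl⟩
  | cons c rest =>
    by_cases hc : c = ' '
    · exact ⟨[], splitSp rest, by simp [splitSp, hc]⟩
    · rcases splitSp_ne_nil rest with ⟨h, t, ht⟩
      exact ⟨c :: h, t, by simp [splitSp, hc, ht, consHead]⟩

lemma consHead_consHead (p q : List Char) (l : List (List Char)) :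
    consHead p (consHead q l) = consHead (p ++ q) l := by
  cases l <;> simp [consHead]

lemma go_spec : ∀ (fuel : Nat) (l cur : List Char) (acc : List (List Char)), l.length < fuel →
    PySem.Chars.splitOn.go [' '] fuel l cur acc
      = acc.reverse ++ consHead cur.reverse (splitSp l) := by
  intro fuel
  induction fuel with
  | zero => intro l cur acc h; omega
  | succ f ih =>
    intro l cur acc h
    cases l with
    | nil =>
      rw [PySem.Chars.splitOn.go.eq_def]
      simp [splitSp, consHead]
    | cons c rest =>
      rw [PySem.Chars.splitOn.go.eq_def]
      by_cases hc : c = ' '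
      · subst hc
        have hpre : [' '].isPrefixOf (' ' :: rest) = true := by simp [List.isPrefixOf]
        simp only [hpre, if_true]
        rcases splitSp_ne_nil rest with ⟨h1, t1, ht⟩
        have hlt : rest.length < f := by simpa using Nat.lt_of_succ_lt_succ h
        simp [ih rest [] (cur.reverse :: acc) hlt, splitSp, ht, consHead]
      · have hpre : [' '].isPrefixOf (c :: rest) = false := by
          simp [List.isPrefixOf]; exact fun hh => hc hh.symm
        simp only [hpre, Bool.false_eq_true, if_false]
        have hlt : rest.length < f := by simpa using Nat.lt_of_succ_lt_succ h
        rw [ih rest (c :: cur) acc hlt]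
        simp [splitSp, hc, consHead_consHead]

lemma splitOn_eq_splitSp (l : List Char) :
    PySem.Chars.splitOn l [' '] = splitSp l := by
  rcases splitSp_ne_nil l with ⟨h, t, ht⟩
  unfold PySem.Chars.splitOn
  rw [go_spec (l.length + 1) l [] [] (by omega)]
  simp [ht, consHead]

lemma tokensScan_eq : ∀ (l cur : List Char),
    tokensScan l cur = List.intersperse " " ((consHead cur (splitSp l)).map String.ofList) := by
  intro l
  induction l with
  | nil => intro cur; simp [tokensScan, splitSp, consHead]
  | cons c rest ih =>
    intro cur
    by_cases hc : c = ' '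
    · subst hc
      rcases splitSp_ne_nil rest with ⟨h, t, ht⟩
      simp [tokensScan, splitSp, consHead, ih [], ht]
    · simp [tokensScan, hc, splitSp, ih (cur ++ [c]), consHead_consHead]

lemma foldl_app (ts : List String) (init : List String) :
    ts.foldl (fun acc token => acc ++ [token, " "]) init
      = init ++ ts.flatMap (fun token => [token, " "]) := by
  induction ts generalizing init with
  | nil => simp
  | cons h t ih => simp [List.foldl_cons, ih]

lemma dropLast_flatMap (ts : List String) :
    (ts.flatMap (fun token => [token, " "])).dropLast = List.intersperse " " ts := by
  induction ts with
  | nil => simp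
  | cons h t ih =>
    cases t with
    | nil => simp [List.intersperse]
    | cons h2 t2 =>
      simp only [List.flatMap_cons, List.cons_append, List.nil_append] at *
      rw [List.dropLast_cons₂, List.dropLast_cons₂, ih]
      simp [List.intersperse]

-- ===== VERDICT (by name: the statement is the Claim_ definition above) =====
theorem tokens_from_spec : Claim_equal_tokens_from := by
  intro text _
  unfold Spec_tokens_from tokens_from tokens_from_alt
  rcases splitSp_ne_nil text.toList with ⟨h, t, ht⟩
  rw [splitOn_eq_splitSp, foldl_app, PySem.List.slice_to_neg_one, List.nil_append,
    dropLast_flatMap, tokensScan_eq]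
  simp [ht, consHead]
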